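-- pv_equiv track=rewrite | github.com/thenielthevis/fullraspi-system | objectTest2.py | get_sectors_as_string
-- ===== SOURCE A (Python) =====
-- def get_sectors_as_string(detected_sectors):
--     """Convert detected sectors to a formatted string"""
--     if not detected_sectors:
--         return "No balls detected"
--
--     # Count occurrences of each sector
--     sector_counts = {}
--     for sector in detected_sectors:
--         sector_counts[sector] = sector_counts.get(sector, 0) + 1
--
--     # Format as string
--     result_parts = []
--     for sector, count in sector_counts.items():
--         if count == 1:
--             result_parts.append(f"{sector}")
--         else:
--             result_parts.append(f"{sector}({count})")
--
--     return ", ".join(result_parts)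
-- ===== SOURCE B (Python) =====
-- def get_sectors_as_string(detected_sectors):
--     """Convert detected sectors to a formatted string"""
--     if not detected_sectors:
--         return "No balls detected"
--     parts = []
--     rest = detected_sectors
--     while rest:
--         sector = rest[0]
--         count = rest.count(sector)
--         parts.append(sector if count == 1 else f"{sector}({count})")
--         rest = [x for x in rest if x != sector]
--     return ", ".join(parts)
-- ===== Notes on version B (the rewrite author's own statement) =====
-- stated objective: alternative
-- what changed: Replaced A's single-pass count-dictionary accumulation by a group-peeling loop: repeatedly take the head sector of the remaining list, count and remove all its occurrences, and emit one formatted part per peeled group; no counting table or dedup step is ever built.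
import Mathlib
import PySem

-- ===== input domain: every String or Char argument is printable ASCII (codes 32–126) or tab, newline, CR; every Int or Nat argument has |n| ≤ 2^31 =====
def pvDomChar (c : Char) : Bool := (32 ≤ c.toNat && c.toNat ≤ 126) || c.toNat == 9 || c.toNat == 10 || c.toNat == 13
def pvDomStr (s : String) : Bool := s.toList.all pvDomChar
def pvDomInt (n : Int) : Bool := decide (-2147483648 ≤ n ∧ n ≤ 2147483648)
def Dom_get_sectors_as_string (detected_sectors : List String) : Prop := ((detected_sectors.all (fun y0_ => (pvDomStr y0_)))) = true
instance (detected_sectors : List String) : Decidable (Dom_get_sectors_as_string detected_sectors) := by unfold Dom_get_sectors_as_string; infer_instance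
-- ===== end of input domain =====

-- B replaces A's single-pass count dictionary by a group-peeling loop (take the head
-- sector of the remaining list, count and remove all its occurrences, emit one part,
-- repeat) — an alternative decomposition with the same return value.

-- shared formatting of one (sector, count) entry — f"{sector}" / f"{sector}({count})"
def pvFmt (sector : String) (count : Int) : String :=
  if count = 1 then sector
  else PySem.Str.join "" [sector, "(", PySem.Int.toStr count, ")"]

-- ===== PORT A =====
def get_sectors_as_string (detected_sectors : List String) : String :=
  if detected_sectors = [] then "No balls detected"
  else
    -- sector_counts[sector] = sector_counts.get(sector, 0) + 1
    let sector_counts : PySem.Dict String Int :=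
      detected_sectors.foldl (fun d s => d.insert s (d.getD s 0 + 1)) PySem.Dict.empty
    -- for sector, count in sector_counts.items(): result_parts.append(…)
    let result_parts : List String :=
      sector_counts.items.foldl (fun acc p => acc ++ [pvFmt p.1 p.2]) []
    PySem.Str.join ", " result_parts

-- ===== PORT B =====
-- the while loop of Source B: peel the head group off `rest` until it is empty
def pvPeel (rest : List String) : List String :=
  match rest with
  | [] => []
  | sector :: tail =>
      -- count = rest.count(sector); rest = [x for x in rest if x != sector]
      pvFmt sector (PySem.List.count (sector :: tail) sector : Int)
        :: pvPeel ((sector :: tail).filter (fun x => decide (x ≠ sector)))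
termination_by rest.length
decreasing_by
  simp only [List.filter_cons, ne_eq, decide_not, decide_true, Bool.not_true,
    Bool.false_eq_true, if_false, List.length_cons]
  exact Nat.lt_succ_of_le (List.length_filter_le _ _)

def get_sectors_as_string_alt (detected_sectors : List String) : String :=
  if detected_sectors = [] then "No balls detected"
  else PySem.Str.join ", " (pvPeel detected_sectors)

-- ===== PRECONDITION & SPEC =====
def Spec_get_sectors_as_string (detected_sectors : List String) (out : String) : Prop := out = get_sectors_as_string_alt detected_sectors
instance (detected_sectors : List String) (out : String) : Decidable (Spec_get_sectors_as_string detected_sectors out) := by unfold Spec_get_sectors_as_string; infer_instance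

-- ===== CLAIM (what is proved, stated in full; the proofs are below) =====
def Claim_equal_get_sectors_as_string : Prop := ∀ (detected_sectors : List String), Dom_get_sectors_as_string detected_sectors → Spec_get_sectors_as_string detected_sectors (get_sectors_as_string detected_sectors)

-- ===== LEMMAS AND PROOFS =====

theorem pvPeel_nil : pvPeel [] = [] := by rw [pvPeel]

theorem pvPeel_cons (s : String) (t : List String) :
    pvPeel (s :: t) = pvFmt s (PySem.List.count (s :: t) s : Int)
      :: pvPeel ((s :: t).filter (fun x => decide (x ≠ s))) := by
  rw [pvPeel]

-- folding Set.add over elements ≠ s through a set headed by s peels the head off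
theorem pv_foldl_add_cons (s : String) :
    ∀ (l : List String) (A : List String), s ∉ l →
      l.foldl PySem.Set.add (s :: A) = s :: l.foldl PySem.Set.add A := by
  intro l
  induction l with
  | nil => intro A _; rfl
  | cons x t ih =>
      intro A hs
      have hxs : x ≠ s := fun h => hs (h ▸ List.mem_cons_self)
      have hadd : PySem.Set.add (s :: A) x = s :: PySem.Set.add A x := by
        simp [PySem.Set.add, PySem.Set.contains, hxs]
        split <;> rfl
      simp only [List.foldl_cons, hadd]
      exact ih _ (fun h => hs (List.mem_cons_of_mem _ h))

-- folding Set.add ignores elements already present (here: occurrences of s)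
theorem pv_foldl_add_filter (s : String) :
    ∀ (l : List String) (A : List String), s ∈ A →
      l.foldl PySem.Set.add A = (l.filter (fun x => decide (x ≠ s))).foldl PySem.Set.add A := by
  intro l
  induction l with
  | nil => intro A _; rfl
  | cons x t ih =>
      intro A hs
      by_cases hx : x = s
      · subst hx
        have hA : PySem.Set.add A x = A := by
          simp [PySem.Set.add, PySem.Set.contains, hs]
        rw [List.foldl_cons, hA, List.filter_cons, if_neg (by simp)]
        exact ih A hs
      · have hmem : s ∈ PySem.Set.add A x := by
          simp [PySem.Set.add]; split <;> simp [hs]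
        rw [List.foldl_cons, List.filter_cons, if_pos (by simp [hx]), List.foldl_cons]
        exact ih _ hmem

-- first-occurrence dedup peels the head group: dedup (s :: t) = s :: dedup (t minus s)
theorem pv_dedup_cons (s : String) (t : List String) :
    PySem.List.dedup (s :: t)
      = s :: PySem.List.dedup (t.filter (fun x => decide (x ≠ s))) := by
  have h1 : PySem.List.dedup (s :: t) = t.foldl PySem.Set.add [s] := by
    simp [PySem.List.dedup_eq_ofList, PySem.Set.ofList_eq_foldl]
  have h2 : PySem.List.dedup (t.filter (fun x => decide (x ≠ s)))
      = (t.filter (fun x => decide (x ≠ s))).foldl PySem.Set.add [] := by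
    simp [PySem.List.dedup_eq_ofList, PySem.Set.ofList_eq_foldl]
  rw [h1, h2]
  rw [pv_foldl_add_filter s t [s] List.mem_cons_self]
  exact pv_foldl_add_cons s _ [] (by simp)

-- the peel loop computes the formatted total counts in first-appearance order
theorem pv_peel_eq_map :
    ∀ n (r : List String), r.length ≤ n →
      pvPeel r = (PySem.List.dedup r).map
        (fun k => pvFmt k (PySem.List.count r k : Int)) := by
  intro n
  induction n with
  | zero =>
      intro r hr
      have h0 : r = [] := List.length_eq_zero_iff.mp (Nat.le_zero.mp hr)
      subst h0
      simp [pvPeel_nil, PySem.List.dedup_eq_ofList, PySem.Set.ofList_eq_foldl]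
  | succ n ih =>
      intro r hr
      match r with
      | [] => simp [pvPeel_nil, PySem.List.dedup_eq_ofList, PySem.Set.ofList_eq_foldl]
      | s :: t =>
          rw [pvPeel_cons]
          have hfc : (s :: t).filter (fun x => decide (x ≠ s))
              = t.filter (fun x => decide (x ≠ s)) := by
            simp
          rw [hfc, pv_dedup_cons, List.map_cons]
          have hlen : (t.filter (fun x => decide (x ≠ s))).length ≤ n := by
            have h1 := List.length_filter_le (fun x => decide (x ≠ s)) t
            have h2 : t.length ≤ n := Nat.succ_le_succ_iff.mp hr
            omega
          rw [ih _ hlen]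
          congr 1
          apply List.map_congr_left
          intro k hk
          have hkf : k ∈ t.filter (fun x => decide (x ≠ s)) :=
            (PySem.List.mem_dedup _ _).mp hk
          have hks : k ≠ s := by
            have h3 := List.of_mem_filter hkf
            simpa using h3
          have hcount : PySem.List.count (t.filter (fun x => decide (x ≠ s))) k
              = PySem.List.count (s :: t) k := by
            simp only [PySem.List.count_eq]
            rw [List.count_cons_of_ne hks.symm]
            exact List.count_filter (by simpa using hks)
          rw [hcount]

-- ===== VERDICT (by name: the statement is the Claim_ definition above) =====
theorem get_sectors_as_string_spec : Claim_equal_get_sectors_as_string := by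
  intro xs _
  unfold Spec_get_sectors_as_string
  unfold get_sectors_as_string get_sectors_as_string_alt
  by_cases h : xs = []
  · simp [h]
  · simp only [if_neg h]
    rw [PySem.Dict.foldl_insert_getD_add_one_eq_counter,
        PySem.List.foldl_append_singleton_eq_map,
        PySem.Dict.items_counter,
        pv_peel_eq_map xs.length xs (le_refl _)]
    simp only [List.map_map, PySem.List.dedup_eq_ofList]
    rfl
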